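-- pv_equiv track=rewrite | github.com/lishilong8848/panorama | app/modules/updater/service/runtime_dependency_sync_service.py | _extract_failure_reason
-- ===== SOURCE A (Python) =====
-- def _extract_failure_reason(detail: str) -> str:
--     lines = [str(line or "").strip() for line in str(detail or "").splitlines() if str(line or "").strip()]
--     if not lines:
--         return "未知错误"
--     for line in reversed(lines):
--         lowered = line.lower()
--         if "error:" in lowered or "proxyerror" in lowered or "timed out" in lowered:
--             return line
--     return lines[-1]
-- ===== SOURCE B (Python) =====
-- def _extract_failure_reason(detail: str) -> str:
--     # Single streaming pass: no intermediate list of lines, no reversal.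
--     last_line = None
--     last_match = None
--     for raw in str(detail or "").splitlines():
--         line = str(raw or "").strip()
--         if not line:
--             continue
--         last_line = line
--         if "error:" in line.lower() or "proxyerror" in line.lower() or "timed out" in line.lower():
--             last_match = line
--     if last_line is None:
--         return "未知错误"
--     return last_match if last_match is not None else last_line
-- ===== Notes on version B (the rewrite author's own statement) =====
-- stated objective: alternative
-- what changed: Replaces A's build-a-list-then-reverse-scan-with-early-return by a single forward streaming pass that keeps two accumulators (last non-empty line, last keyword-matching line) and never materialises the line list.
import Mathlib
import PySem

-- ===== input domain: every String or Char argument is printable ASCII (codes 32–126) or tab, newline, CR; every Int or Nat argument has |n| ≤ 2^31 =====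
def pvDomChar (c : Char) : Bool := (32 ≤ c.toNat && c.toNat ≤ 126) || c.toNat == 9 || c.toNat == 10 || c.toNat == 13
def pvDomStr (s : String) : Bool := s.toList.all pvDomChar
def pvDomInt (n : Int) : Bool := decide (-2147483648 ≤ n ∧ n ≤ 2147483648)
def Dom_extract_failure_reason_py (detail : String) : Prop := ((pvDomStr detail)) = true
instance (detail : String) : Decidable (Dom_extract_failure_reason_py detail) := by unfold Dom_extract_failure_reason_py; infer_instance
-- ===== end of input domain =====

-- B replaces A's build-list-then-reverse-scan by ONE forward streaming pass with two
-- accumulators (last non-empty line, last keyword line); no intermediate list (objective: alternative).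

-- ===== PORT A =====
-- A's loop 'for line in reversed(lines): … return line' as a first-match recursion
def pvScanRev : List String → Option String
  | [] => none
  | line :: rest =>
    let lowered := PySem.Str.lower line
    if PySem.Str.isIn "error:" lowered || PySem.Str.isIn "proxyerror" lowered
        || PySem.Str.isIn "timed out" lowered then some line
    else pvScanRev rest

def extract_failure_reason_py (detail : String) : String :=
  -- 'str(line or "")'/'str(detail or "")' are identity on str inputs
  let lines := ((PySem.Str.splitlines detail).filter
      (fun line => PySem.Str.strip line ≠ "")).map (fun line => PySem.Str.strip line)
  if lines = [] then "未知错误"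
  else
    match pvScanRev lines.reverse with
    | some line => line
    | none => lines.getLastD ""  -- lines[-1], lines nonempty here

-- ===== PORT B =====
def pvIsFailureLine (line : String) : Bool :=
  PySem.Str.isIn "error:" (PySem.Str.lower line) || PySem.Str.isIn "proxyerror" (PySem.Str.lower line)
    || PySem.Str.isIn "timed out" (PySem.Str.lower line)

-- one iteration of B's streaming loop over (last_line, last_match)
def pvStep (st : Option String × Option String) (raw : String) : Option String × Option String :=
  let line := PySem.Str.strip raw
  if line = "" then st
  else (some line, if pvIsFailureLine line then some line else st.2)

def extract_failure_reason_py_alt (detail : String) : String :=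
  let st := (PySem.Str.splitlines detail).foldl pvStep (none, none)
  match st.1 with
  | none => "未知错误"
  | some last_line =>
    match st.2 with
    | some last_match => last_match
    | none => last_line

-- ===== PRECONDITION & SPEC =====
def Spec_extract_failure_reason_py (detail : String) (out : String) : Prop := out = extract_failure_reason_py_alt detail
instance (detail : String) (out : String) : Decidable (Spec_extract_failure_reason_py detail out) := by unfold Spec_extract_failure_reason_py; infer_instance

-- ===== CLAIM (what is proved, stated in full; the proofs are below) =====
def Claim_equal_extract_failure_reason_py : Prop := ∀ (detail : String), Dom_extract_failure_reason_py detail → Spec_extract_failure_reason_py detail (extract_failure_reason_py detail)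

-- ===== LEMMAS AND PROOFS =====
-- the stripped non-empty lines of a raw line list (A's 'lines')
def pvLines (L : List String) : List String :=
  (L.filter (fun line => PySem.Str.strip line ≠ "")).map (fun line => PySem.Str.strip line)

-- A's reversed first-match scan finds the last keyword line: filter-then-getLast?.
theorem pvScanRev_eq (M : List String) :
    pvScanRev M = ((M.reverse).filter pvIsFailureLine).getLast? := by
  induction M with
  | nil => rfl
  | cons x t ih =>
    show (if pvIsFailureLine x then some x else pvScanRev t) = _
    rw [List.reverse_cons, List.filter_append, List.getLast?_append]
    by_cases h : pvIsFailureLine x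
    · simp [h]
    · simp [h, ih]

-- B's streaming fold computes the last non-empty line and the last keyword line.
theorem pvFold_eq (L : List String) (a b : Option String) :
    L.foldl pvStep (a, b) =
      ((pvLines L).getLast?.or a, (((pvLines L).filter pvIsFailureLine).getLast?).or b) := by
  induction L generalizing a b with
  | nil => simp [pvLines]
  | cons x t ih =>
    rw [List.foldl_cons]
    by_cases h : PySem.Str.strip x = ""
    · have hstep : pvStep (a, b) x = (a, b) := by simp [pvStep, h]
      have hlines : pvLines (x :: t) = pvLines t := by simp [pvLines, h]
      rw [hstep, ih, hlines]
    · have hstep : pvStep (a, b) x =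
          (some (PySem.Str.strip x),
           if pvIsFailureLine (PySem.Str.strip x) then some (PySem.Str.strip x) else b) := by
        simp [pvStep, h]
      have hlines : pvLines (x :: t) = PySem.Str.strip x :: pvLines t := by
        simp [pvLines, h]
      rw [hstep, ih, hlines]
      refine Prod.ext ?_ ?_
      · rcases hgl : (pvLines t).getLast? with _ | y <;>
          simp [List.getLast?_cons, hgl]
      · by_cases hm : pvIsFailureLine (PySem.Str.strip x)
        · simp only [List.filter_cons, hm, if_true]
          rcases hgl : ((pvLines t).filter pvIsFailureLine).getLast? with _ | y <;>
            simp [List.getLast?_cons, hgl]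
        · simp [hm]

-- ===== VERDICT (by name: the statement is the Claim_ definition above) =====
theorem extract_failure_reason_py_spec : Claim_equal_extract_failure_reason_py := by
  intro detail _
  unfold Spec_extract_failure_reason_py extract_failure_reason_py extract_failure_reason_py_alt
  rw [pvFold_eq]
  have e : ((PySem.Str.splitlines detail).filter
      (fun line => PySem.Str.strip line ≠ "")).map (fun line => PySem.Str.strip line)
      = pvLines (PySem.Str.splitlines detail) := rfl
  rw [e]
  set lines := pvLines (PySem.Str.splitlines detail) with hl
  by_cases h : lines = []
  · simp [h]
  · simp only [h, if_false, Option.or_none]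
    rw [pvScanRev_eq, List.reverse_reverse]
    rcases hll : lines.getLast? with _ | y
    · exact absurd (List.getLast?_eq_none_iff.mp hll) h
    · rcases hms : (lines.filter pvIsFailureLine).getLast? with _ | m
      · simp [List.getLastD_eq_getLast?, hll]
      · simp
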